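-- pv_equiv track=rewrite | github.com/MarekGoz/radix-sort-date-visualizer | radix_sort.py | radix_sort_dates
-- ===== SOURCE A (Python) =====
-- def counting_sort(data, key_func,
--                   max_value):  # Sortowanie przez zliczanie (sortuje wartości juz w ramach jednej składowej daty)
--     count = [0] * (max_value + 1)
--     output = [None] * len(data)
--
--     # Policz wystąpienia każdego klucza
--     for item in data:
--         key = key_func(item)
--         count[key] += 1
--
--     # Zliczaj liczby, aby określić pozycję
--     for i in range(1, len(count)):
--         count[i] += count[i - 1]
--
--     # Zbuduj tablicę wyjściową (sortowanie stabilne)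
--     for item in reversed(data):
--         key = key_func(item)
--         count[key] -= 1
--         output[count[key]] = item
--
--     return output
--
-- def radix_sort_dates(dates):  # Maksymalne wartości dla składowych daty, aby utworzyć odpowiednią liczbę komórek tablicy
--     max_values = {
--         "second": 99,
--         "minute": 99,
--         "hour": 99,
--         "day": 99,
--         "month": 99,
--         "year": 9999
--     }
--
--     # Zdefiniuj kolejność sortowania (od pola najmniej znaczącego do najbardziej znaczącego)
--     # Lecimy od najmniej znaczacego pola do najbardziej znaczącego (od sekund do lat)
--     fields = [
--         ("second", lambda x: x[5]),
--         ("minute", lambda x: x[4]),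
--         ("hour", lambda x: x[3]),
--         ("day", lambda x: x[2]),
--         ("month", lambda x: x[1]),
--         ("year", lambda x: x[0])
--     ]
--
--     # Wykonaj sortowanie zliczające dla każdego pola w określonej kolejności
--     for field, key_func in fields:  # Iteruje sie po wartosciach w dacie
--         max_value = max_values[field]
--         dates = counting_sort(dates, key_func, max_value)
--
--     return dates
-- ===== SOURCE B (Python) =====
-- def radix_sort_dates(dates):
--     # LSD bucket sort: for each date component, least significant first,
--     # drop every date into the bucket of that component (year: 10000
--     # buckets, the rest: 100) and read the buckets back in order.
--     for field, size in ((5, 100), (4, 100), (3, 100), (2, 100), (1, 100), (0, 10000)):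
--         buckets = [[] for _ in range(size)]
--         for date in dates:
--             buckets[date[field]].append(date)
--         dates = [date for bucket in buckets for date in bucket]
--     return dates
-- ===== Notes on version B (the rewrite author's own statement) =====
-- stated objective: simpler
-- what changed: Each counting-sort pass (count table, prefix sums, reversed placement into a preallocated output) is replaced by a direct bucket-sort pass: dates are appended to per-value bucket lists and the buckets are concatenated, so the prefix-sum and reversed-placement loops and the counting_sort helper disappear.
import Mathlib
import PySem

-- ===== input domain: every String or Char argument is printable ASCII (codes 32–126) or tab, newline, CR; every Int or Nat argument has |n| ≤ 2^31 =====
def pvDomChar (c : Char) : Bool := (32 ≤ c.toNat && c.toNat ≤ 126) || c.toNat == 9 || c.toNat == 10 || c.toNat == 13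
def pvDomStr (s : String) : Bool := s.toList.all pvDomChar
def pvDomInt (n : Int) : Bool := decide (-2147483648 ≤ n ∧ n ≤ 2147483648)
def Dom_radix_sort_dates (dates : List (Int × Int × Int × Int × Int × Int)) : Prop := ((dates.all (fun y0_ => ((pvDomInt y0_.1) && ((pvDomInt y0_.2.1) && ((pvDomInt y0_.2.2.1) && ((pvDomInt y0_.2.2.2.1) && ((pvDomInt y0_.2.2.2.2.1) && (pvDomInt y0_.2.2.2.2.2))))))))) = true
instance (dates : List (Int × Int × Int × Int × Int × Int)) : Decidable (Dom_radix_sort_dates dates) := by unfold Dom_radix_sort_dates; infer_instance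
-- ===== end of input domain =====

-- B replaces each counting-sort pass (count table, prefix sums, reversed placement)
-- by a direct bucket-sort pass: append to per-value bucket lists, then concatenate
-- the buckets; objective: simpler, not claimed faster.

-- ===== PORT A =====
-- Python's count/output are plain lists MUTATED by index; they are ported as
-- Arrays (Lean's in-place-updatable sequence) with Python's index rule:
-- pv_pyGetA / pv_pySetA are xs[i] / xs[i] = v via PySem.List.pyIdx? (negative
-- wraparound; none = IndexError, the default/no-op is never reached on inputs
-- Pre_ admits).
def pv_pyGetA {α : Type} (a : Array α) (i : Int) (d : α) : α :=
  match PySem.List.pyIdx? a.size i with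
  | some n => a.getD n d
  | none => d

def pv_pySetA {α : Type} (a : Array α) (i : Int) (v : α) : Array α :=
  match PySem.List.pyIdx? a.size i with
  | some n => a.setIfInBounds n v
  | none => a

-- port of counting_sort (A's helper), specialised to the date tuples it is used on
def pv_counting_sort (data : List (Int × Int × Int × Int × Int × Int))
    (key_func : (Int × Int × Int × Int × Int × Int) → Int) (max_value : Int) :
    List (Int × Int × Int × Int × Int × Int) :=
  -- count = [0] * (max_value + 1)
  let count : Array Int := Array.replicate (max_value + 1).toNat 0
  -- output = [None] * len(data)
  let output : Array (Option (Int × Int × Int × Int × Int × Int)) :=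
    Array.replicate data.length none
  -- for item in data: count[key_func(item)] += 1
  let count := data.foldl (fun c item =>
    pv_pySetA c (key_func item) (pv_pyGetA c (key_func item) 0 + 1)) count
  -- for i in range(1, len(count)): count[i] += count[i-1]
  let count := (PySem.List.pyRange 1 (count.size : Int) 1).foldl (fun c i =>
    pv_pySetA c i (pv_pyGetA c i 0 + pv_pyGetA c (i - 1) 0)) count
  -- for item in reversed(data): count[key] -= 1; output[count[key]] = item
  let st := data.reverse.foldl
    (fun (s : Array Int × Array (Option (Int × Int × Int × Int × Int × Int))) item =>
      let key := key_func item
      let c := pv_pySetA s.1 key (pv_pyGetA s.1 key 0 - 1)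
      (c, pv_pySetA s.2 (pv_pyGetA c key 0) (some item)))
    (count, output)
  -- return output — on the admitted inputs (Pre_) every slot has been written,
  -- so dropping the 'none' placeholders is exact
  st.2.toList.reduceOption

def radix_sort_dates (dates : List (Int × Int × Int × Int × Int × Int)) :
    List (Int × Int × Int × Int × Int × Int) :=
  let max_values : PySem.Dict String Int := PySem.Dict.ofList
    [("second", 99), ("minute", 99), ("hour", 99), ("day", 99), ("month", 99), ("year", 9999)]
  let fields : List (String × ((Int × Int × Int × Int × Int × Int) → Int)) :=
    [("second", fun x => x.2.2.2.2.2), ("minute", fun x => x.2.2.2.2.1),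
     ("hour", fun x => x.2.2.2.1), ("day", fun x => x.2.2.1),
     ("month", fun x => x.2.1), ("year", fun x => x.1)]
  -- max_values[field]: every field name is a key of the dict, so Python's KeyError
  -- branch is unreachable and getD is exact here
  fields.foldl (fun ds fk => pv_counting_sort ds fk.2 (PySem.Dict.getD max_values fk.1 0)) dates

-- ===== PORT B =====
-- Source B iterates over ((5,100),(4,100),(3,100),(2,100),(1,100),(0,10000)); Python's
-- date[field] with the literal field index of each pass is ported as the matching
-- tuple projection, kept paired with its bucket count as in Source B.
-- buckets[date[field]] is Python list indexing: pyGetD/pySetD (the default is never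
-- read where indexing succeeds; where Python raises IndexError the input is outside
-- Pre_ below and nothing is claimed).
def radix_sort_dates_alt (dates : List (Int × Int × Int × Int × Int × Int)) :
    List (Int × Int × Int × Int × Int × Int) :=
  let passes : List (((Int × Int × Int × Int × Int × Int) → Int) × Int) :=
    [(fun x => x.2.2.2.2.2, 100), (fun x => x.2.2.2.2.1, 100),
     (fun x => x.2.2.2.1, 100), (fun x => x.2.2.1, 100),
     (fun x => x.2.1, 100), (fun x => x.1, 10000)]
  passes.foldl (fun ds p =>
    -- buckets = [[] for _ in range(size)]
    let buckets : List (List (Int × Int × Int × Int × Int × Int)) :=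
      List.replicate p.2.toNat []
    -- for date in dates: buckets[date[field]].append(date)
    let buckets := ds.foldl (fun bs d =>
      PySem.List.pySetD bs (p.1 d) (PySem.List.pyGetD bs (p.1 d) [] ++ [d])) buckets
    -- dates = [date for bucket in buckets for date in bucket]
    buckets.flatten) dates

-- ===== PRECONDITION & SPEC =====
-- Pre_ admits exactly the inputs on which A returns: every field must lie in
-- [-(max+1), max] (year: max 9999, the others 99) — outside that range A's
-- 'count[key] += 1' raises IndexError.
def Pre_radix_sort_dates (dates : List (Int × Int × Int × Int × Int × Int)) : Prop :=
  ∀ x ∈ dates,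
    (-10000 ≤ x.1 ∧ x.1 ≤ 9999) ∧
    (-100 ≤ x.2.1 ∧ x.2.1 ≤ 99) ∧
    (-100 ≤ x.2.2.1 ∧ x.2.2.1 ≤ 99) ∧
    (-100 ≤ x.2.2.2.1 ∧ x.2.2.2.1 ≤ 99) ∧
    (-100 ≤ x.2.2.2.2.1 ∧ x.2.2.2.2.1 ≤ 99) ∧
    (-100 ≤ x.2.2.2.2.2 ∧ x.2.2.2.2.2 ≤ 99)
instance (dates : List (Int × Int × Int × Int × Int × Int)) : Decidable (Pre_radix_sort_dates dates) := by
  unfold Pre_radix_sort_dates; infer_instance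

def pvWitness_radix_sort_dates : (List (Int × Int × Int × Int × Int × Int)) :=
  [(2020, 5, 17, 12, 30, 59), (2019, 12, 31, 23, 59, 58), (2020, 5, 17, 12, 30, -1)]

def Spec_radix_sort_dates (dates : List (Int × Int × Int × Int × Int × Int)) (out : List (Int × Int × Int × Int × Int × Int)) : Prop := out = radix_sort_dates_alt dates
instance (dates : List (Int × Int × Int × Int × Int × Int)) (out : List (Int × Int × Int × Int × Int × Int)) : Decidable (Spec_radix_sort_dates dates out) := by unfold Spec_radix_sort_dates; infer_instance

-- ===== CLAIM (what is proved, stated in full; the proofs are below) =====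
def Claim_equal_radix_sort_dates : Prop := ∀ (dates : List (Int × Int × Int × Int × Int × Int)), Dom_radix_sort_dates dates → Pre_radix_sort_dates dates → Spec_radix_sort_dates dates (radix_sort_dates dates)

-- ===== LEMMAS AND PROOFS =====

abbrev PvTup := Int × Int × Int × Int × Int × Int

-- the Nat key a counting-sort pass actually buckets by: the Python index that
-- 'count[key]' reads (wraparound indexing), i.e. the field value modulo the table size
def pvKeyOf (kf : PvTup → Int) (L : Nat) (x : PvTup) : Nat := ((kf x) % (L : Int)).toNat

-- bucket-concatenation normal form of one stable counting-sort pass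
def pvF (sz : Nat) (g : PvTup → Nat) (l : List PvTup) : List PvTup :=
  (List.range sz).flatMap (fun k => l.filter (fun x => g x == k))

def pvLow (g : PvTup → Nat) (l : List PvTup) (j : Nat) : Nat := l.countP (fun x => g x < j)
def pvCnt (g : PvTup → Nat) (l : List PvTup) (j : Nat) : Nat := l.countP (fun x => g x == j)

-- the per-pass bucket keys (field mod table size) and the packed suffix keys
def pvG1 : PvTup → Nat := pvKeyOf (fun x => x.2.2.2.2.2) 100
def pvG2 : PvTup → Nat := pvKeyOf (fun x => x.2.2.2.2.1) 100
def pvG3 : PvTup → Nat := pvKeyOf (fun x => x.2.2.2.1) 100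
def pvG4 : PvTup → Nat := pvKeyOf (fun x => x.2.2.1) 100
def pvG5 : PvTup → Nat := pvKeyOf (fun x => x.2.1) 100
def pvG6 : PvTup → Nat := pvKeyOf (fun x => x.1) 10000
def pvP1 (x : PvTup) : Int := (pvG1 x : Int)
def pvP2 (x : PvTup) : Int := (pvG2 x : Int) * 100 + pvP1 x
def pvP3 (x : PvTup) : Int := (pvG3 x : Int) * 10000 + pvP2 x
def pvP4 (x : PvTup) : Int := (pvG4 x : Int) * 1000000 + pvP3 x
def pvP5 (x : PvTup) : Int := (pvG5 x : Int) * 100000000 + pvP4 x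
def pvP6 (x : PvTup) : Int := (pvG6 x : Int) * 10000000000 + pvP5 x

-- ---- index normalisation: Python's wraparound indexing is "mod the length" ----

theorem pv_pyIdx_wrap (L : Nat) (i : Int) (h1 : -(L : Int) ≤ i) (h2 : i < L) :
    PySem.List.pyIdx? L i = some (i % (L : Int)).toNat := by
  unfold PySem.List.pyIdx?
  split_ifs with ha
  · rw [Int.emod_eq_of_lt ha h2]
  · have hm : i % (L : Int) = i + L := by
      rw [← Int.add_emod_right]; exact Int.emod_eq_of_lt (by omega) (by omega)
    rw [hm]; congr 1; omega

theorem pv_pyGetD_wrap {α : Type} (c : List α) (i : Int) (d : α)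
    (h1 : -(c.length : Int) ≤ i) (h2 : i < c.length) :
    PySem.List.pyGetD c i d = c.getD (i % (c.length : Int)).toNat d := by
  unfold PySem.List.pyGetD PySem.List.pyGet?
  rw [pv_pyIdx_wrap _ _ h1 h2]
  simp [List.getD_eq_getElem?_getD]

theorem pv_pySetD_wrap {α : Type} (c : List α) (i : Int) (v : α)
    (h1 : -(c.length : Int) ≤ i) (h2 : i < c.length) :
    PySem.List.pySetD c i v = c.set (i % (c.length : Int)).toNat v := by
  unfold PySem.List.pySetD PySem.List.pySet?
  rw [pv_pyIdx_wrap _ _ h1 h2]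
  simp

theorem pv_key_lt (kf : PvTup → Int) (L : Nat) (hL : 0 < L) (x : PvTup) :
    pvKeyOf kf L x < L := by
  unfold pvKeyOf
  have h := Int.emod_lt_of_pos (kf x) (b := (L : Int)) (by exact_mod_cast hL)
  omega

theorem pv_pyGetD_key {α : Type} (c : List α) (kf : PvTup → Int) (L : Nat) (x : PvTup) (d : α)
    (hc : c.length = L) (hk : -(L : Int) ≤ kf x ∧ kf x < L) :
    PySem.List.pyGetD c (kf x) d = c.getD (pvKeyOf kf L x) d := by
  subst hc
  rw [pv_pyGetD_wrap c _ d (by omega) (by omega)]; rfl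

theorem pv_pySetD_key {α : Type} (c : List α) (kf : PvTup → Int) (L : Nat) (x : PvTup) (v : α)
    (hc : c.length = L) (hk : -(L : Int) ≤ kf x ∧ kf x < L) :
    PySem.List.pySetD c (kf x) v = c.set (pvKeyOf kf L x) v := by
  subst hc
  rw [pv_pySetD_wrap c _ v (by omega) (by omega)]; rfl

theorem pv_getD_set (c : List Int) (n j : Nat) (v : Int) (hn : n < c.length) :
    (c.set n v).getD j 0 = if j = n then v else c.getD j 0 := by
  simp only [List.getD_eq_getElem?_getD, List.getElem?_set]
  split_ifs with h h'
  · simp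
  · omega
  · omega
  · rfl

theorem pv_getD_set' {α : Type} (c : List α) (d : α) (n j : Nat) (v : α) (hn : n < c.length) :
    (c.set n v).getD j d = if j = n then v else c.getD j d := by
  simp only [List.getD_eq_getElem?_getD, List.getElem?_set]
  split_ifs with h h'
  · simp
  · omega
  · omega
  · rfl

theorem pv_pyGetD_nat (c : List Int) (u : Nat) (hu : u < c.length) :
    PySem.List.pyGetD c (u : Int) 0 = c.getD u 0 := by
  rw [pv_pyGetD_wrap c _ 0 (by omega) (by exact_mod_cast hu)]
  congr 1
  rw [Int.emod_eq_of_lt (by omega) (by exact_mod_cast hu)]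
  simp

theorem pv_pySetD_nat {α : Type} (c : List α) (u : Nat) (v : α) (hu : u < c.length) :
    PySem.List.pySetD c (u : Int) v = c.set u v := by
  rw [pv_pySetD_wrap c _ v (by omega) (by exact_mod_cast hu)]
  congr 1
  rw [Int.emod_eq_of_lt (by omega) (by exact_mod_cast hu)]
  simp

-- ---- arithmetic facts about pvLow / pvCnt ----

theorem pv_low_succ (g : PvTup → Nat) (l : List PvTup) (j : Nat) :
    pvLow g l (j + 1) = pvLow g l j + pvCnt g l j := by
  unfold pvLow pvCnt
  induction l with
  | nil => rfl
  | cons x t ih =>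
    simp only [List.countP_cons, ih]
    by_cases h : g x = j
    · simp [h]; omega
    · by_cases h2 : g x < j
      · have : g x < j + 1 := by omega
        simp [h, h2, this]; omega
      · have : ¬ g x < j + 1 := by omega
        simp [h, h2, this]

theorem pv_low_mono (g : PvTup → Nat) (l : List PvTup) {j k : Nat} (h : j ≤ k) :
    pvLow g l j ≤ pvLow g l k :=
  List.countP_mono_left (fun x _ hx => by simp_all; omega)

theorem pv_low_eq_length (g : PvTup → Nat) (l : List PvTup) (sz : Nat)
    (h : ∀ x ∈ l, g x < sz) : pvLow g l sz = l.length := by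
  unfold pvLow
  rw [List.countP_eq_length]
  intro x hx; simpa using h x hx

theorem pv_cnt_append (g : PvTup → Nat) (l₁ l₂ : List PvTup) (j : Nat) :
    pvCnt g (l₁ ++ l₂) j = pvCnt g l₁ j + pvCnt g l₂ j := by
  unfold pvCnt; rw [List.countP_append]

theorem pv_cnt_eq_filter_length (g : PvTup → Nat) (l : List PvTup) (j : Nat) :
    (l.filter (fun x => g x == j)).length = pvCnt g l j := by
  unfold pvCnt
  rw [List.countP_eq_length_filter]

theorem pv_low_eq_sum (g : PvTup → Nat) (l : List PvTup) (u : Nat) :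
    ((pvLow g l u : Nat) : Int) = ∑ i ∈ Finset.range u, (pvCnt g l i : Int) := by
  induction u with
  | zero => simp [pvLow]
  | succ j ih => rw [Finset.sum_range_succ, ← ih, pv_low_succ]; push_cast; ring

-- ---- counting loop ----

theorem pv_loop1 (kf : PvTup → Int) (L : Nat) (hL : 0 < L) :
    ∀ (data : List PvTup), (∀ x ∈ data, -(L : Int) ≤ kf x ∧ kf x < L) →
    ∀ (c : List Int), c.length = L →
      (data.foldl (fun c item =>
        PySem.List.pySetD c (kf item) (PySem.List.pyGetD c (kf item) 0 + 1)) c).length = L ∧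
      ∀ j : Nat, j < L →
        (data.foldl (fun c item =>
          PySem.List.pySetD c (kf item) (PySem.List.pyGetD c (kf item) 0 + 1)) c).getD j 0
          = c.getD j 0 + (pvCnt (pvKeyOf kf L) data j : Int) := by
  intro data
  induction data with
  | nil => intro _ c hc; exact ⟨hc, fun j _ => by simp [pvCnt]⟩
  | cons x t ih =>
    intro hk c hc
    have hx := hk x (by simp)
    have hstep : PySem.List.pySetD c (kf x) (PySem.List.pyGetD c (kf x) 0 + 1)
        = c.set (pvKeyOf kf L x) (c.getD (pvKeyOf kf L x) 0 + 1) := by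
      rw [pv_pyGetD_key c kf L x 0 hc hx, pv_pySetD_key c kf L x _ hc hx]
    have hlen : (c.set (pvKeyOf kf L x) (c.getD (pvKeyOf kf L x) 0 + 1)).length = L := by
      simp [hc]
    obtain ⟨ihlen, ihval⟩ := ih (fun y hy => hk y (by simp [hy])) _ hlen
    constructor
    · simpa [hstep] using ihlen
    · intro j hj
      simp only [List.foldl_cons, hstep]
      rw [ihval j hj]
      have hkey : pvKeyOf kf L x < L := pv_key_lt kf L hL x
      rw [pv_getD_set c _ j _ (by omega)]
      have hcnt : pvCnt (pvKeyOf kf L) (x :: t) j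
          = pvCnt (pvKeyOf kf L) t j + (if pvKeyOf kf L x == j then 1 else 0) := by
        simp [pvCnt, List.countP_cons]
      rw [hcnt]
      by_cases h : j = pvKeyOf kf L x
      · simp only [h, BEq.rfl, if_pos]
        push_cast; ring
      · have hne : (pvKeyOf kf L x == j) = false := by simp; omega
        simp [if_neg h, hne]

-- ---- prefix-sum loop ----

theorem pv_loop2_aux (L : Nat) (c : List Int) (hc : c.length = L) :
    ∀ u : Nat, u ≤ L →
      ((PySem.List.pyRange 1 (u : Int) 1).foldl (fun c i =>
        PySem.List.pySetD c i (PySem.List.pyGetD c i 0 + PySem.List.pyGetD c (i - 1) 0)) c).length = L ∧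
      (∀ j : Nat, j < u →
        ((PySem.List.pyRange 1 (u : Int) 1).foldl (fun c i =>
          PySem.List.pySetD c i (PySem.List.pyGetD c i 0 + PySem.List.pyGetD c (i - 1) 0)) c).getD j 0
          = ∑ i ∈ Finset.range (j + 1), c.getD i 0) ∧
      (∀ j : Nat, u ≤ j → j < L →
        ((PySem.List.pyRange 1 (u : Int) 1).foldl (fun c i =>
          PySem.List.pySetD c i (PySem.List.pyGetD c i 0 + PySem.List.pyGetD c (i - 1) 0)) c).getD j 0
          = c.getD j 0) := by
  intro u
  induction u with
  | zero =>
    intro _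
    rw [PySem.List.pyRange_one_eq_nil (by omega)]
    exact ⟨hc, fun j hj => by omega, fun j _ _ => by simp⟩
  | succ u ih =>
    intro hu
    rcases Nat.eq_zero_or_pos u with h0 | hpos
    · subst h0
      rw [show ((1 : Nat) : Int) = 1 by norm_num, PySem.List.pyRange_one_eq_nil (by omega)]
      refine ⟨hc, fun j hj => ?_, fun j _ _ => by simp⟩
      interval_cases j
      simp
    · obtain ⟨ihlen, ihin, ihout⟩ := ih (by omega)
      have hsplit : PySem.List.pyRange 1 ((u + 1 : Nat) : Int) 1
          = PySem.List.pyRange 1 (u : Int) 1 ++ [(u : Int)] := by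
        push_cast
        exact PySem.List.pyRange_one_succ_right (by omega)
      rw [hsplit, List.foldl_append]
      set r := (PySem.List.pyRange 1 (u : Int) 1).foldl (fun c i =>
        PySem.List.pySetD c i (PySem.List.pyGetD c i 0 + PySem.List.pyGetD c (i - 1) 0)) c with hr
      simp only [List.foldl_cons, List.foldl_nil]
      have hru : r.getD u 0 = c.getD u 0 := ihout u (by omega) (by omega)
      have hru1 : r.getD (u - 1) 0 = ∑ i ∈ Finset.range u, c.getD i 0 := by
        have := ihin (u - 1) (by omega)
        rwa [show u - 1 + 1 = u by omega] at this
      have hget : PySem.List.pyGetD r (u : Int) 0 = c.getD u 0 := by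
        rw [pv_pyGetD_nat r u (by omega)]; exact hru
      have hget1 : PySem.List.pyGetD r ((u : Int) - 1) 0 = ∑ i ∈ Finset.range u, c.getD i 0 := by
        rw [show ((u : Int) - 1) = ((u - 1 : Nat) : Int) by omega]
        rw [pv_pyGetD_nat r (u - 1) (by omega)]; exact hru1
      have hset : PySem.List.pySetD r (u : Int) (PySem.List.pyGetD r (u : Int) 0 + PySem.List.pyGetD r ((u : Int) - 1) 0)
          = r.set u (c.getD u 0 + ∑ i ∈ Finset.range u, c.getD i 0) := by
        rw [hget, hget1, pv_pySetD_nat r u _ (by omega)]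
      rw [hset]
      refine ⟨by simp [ihlen], fun j hj => ?_, fun j hj1 hj2 => ?_⟩
      · rw [pv_getD_set r u j _ (by omega)]
        by_cases hju : j = u
        · subst hju
          rw [if_pos rfl, Finset.sum_range_succ]
          ring
        · rw [if_neg hju]
          exact ihin j (by omega)
      · rw [pv_getD_set r u j _ (by omega), if_neg (by omega)]
        exact ihout j (by omega) hj2

-- ---- the bucket normal form pvF ----

theorem pvF_succ (k : Nat) (g : PvTup → Nat) (l : List PvTup) :
    pvF (k + 1) g l = pvF k g l ++ l.filter (fun x => g x == k) := by
  unfold pvF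
  rw [List.range_succ, List.flatMap_append]
  simp

theorem pvF_length (sz : Nat) (g : PvTup → Nat) (l : List PvTup) :
    (pvF sz g l).length = pvLow g l sz := by
  induction sz with
  | zero => simp [pvF, pvLow]
  | succ k ih =>
    rw [pvF_succ, List.length_append, ih, pv_cnt_eq_filter_length, pv_low_succ]

theorem pvF_getElem? (g : PvTup → Nat) (l : List PvTup) (sz j t : Nat)
    (hj : j < sz) (h1 : pvLow g l j ≤ t) (h2 : t < pvLow g l (j + 1)) :
    (pvF sz g l)[t]? = (l.filter (fun x => g x == j))[t - pvLow g l j]? := by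
  induction sz with
  | zero => omega
  | succ k ih =>
    rw [pvF_succ]
    rcases Nat.lt_or_ge j k with hk | hk
    · rw [List.getElem?_append_left, ih hk]
      rw [pvF_length]
      calc t < pvLow g l (j + 1) := h2
        _ ≤ pvLow g l k := pv_low_mono g l (by omega)
    · have hjk : j = k := by omega
      subst hjk
      rw [List.getElem?_append_right (by rw [pvF_length]; exact h1), pvF_length]

theorem pv_exists_region (g : PvTup → Nat) (l : List PvTup) (sz t : Nat)
    (ht : t < pvLow g l sz) :
    ∃ j, j < sz ∧ pvLow g l j ≤ t ∧ t < pvLow g l (j + 1) := by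
  induction sz with
  | zero => simp [pvLow] at ht
  | succ k ih =>
    rcases Nat.lt_or_ge t (pvLow g l k) with h | h
    · obtain ⟨j, hj⟩ := ih h
      exact ⟨j, by omega, hj.2⟩
    · exact ⟨k, by omega, h, ht⟩

theorem pvF_subset (sz : Nat) (g : PvTup → Nat) (l : List PvTup) :
    ∀ x ∈ pvF sz g l, x ∈ l := by
  intro x hx
  unfold pvF at hx
  obtain ⟨k, _, hk⟩ := List.mem_flatMap.mp hx
  exact (List.mem_filter.mp hk).1

-- ---- the reversed placement loop ----

theorem pv_loop3 (data : List PvTup) (kf : PvTup → Int) (L : Nat) (hL : 0 < L)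
    (hk : ∀ x ∈ data, -(L : Int) ≤ kf x ∧ kf x < L)
    (c : List Int) (out : List (Option PvTup)) (hc : c.length = L)
    (hout : out.length = data.length)
    (hini : ∀ j : Nat, j < L → c.getD j 0 = (pvLow (pvKeyOf kf L) data (j + 1) : Int))
    (hall : ∀ t : Nat, t < data.length → out.getD t none = none) :
    ∀ (suf pre : List PvTup), data = pre ++ suf →
      (suf.foldr (fun item s =>
        (PySem.List.pySetD s.1 (kf item) (PySem.List.pyGetD s.1 (kf item) 0 - 1),
         PySem.List.pySetD s.2
           (PySem.List.pyGetD (PySem.List.pySetD s.1 (kf item) (PySem.List.pyGetD s.1 (kf item) 0 - 1)) (kf item) 0)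
           (some item))) (c, out)).1.length = L ∧
      (suf.foldr (fun item s =>
        (PySem.List.pySetD s.1 (kf item) (PySem.List.pyGetD s.1 (kf item) 0 - 1),
         PySem.List.pySetD s.2
           (PySem.List.pyGetD (PySem.List.pySetD s.1 (kf item) (PySem.List.pyGetD s.1 (kf item) 0 - 1)) (kf item) 0)
           (some item))) (c, out)).2.length = data.length ∧
      (∀ j : Nat, j < L →
        (suf.foldr (fun item s =>
          (PySem.List.pySetD s.1 (kf item) (PySem.List.pyGetD s.1 (kf item) 0 - 1),
           PySem.List.pySetD s.2
             (PySem.List.pyGetD (PySem.List.pySetD s.1 (kf item) (PySem.List.pyGetD s.1 (kf item) 0 - 1)) (kf item) 0)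
             (some item))) (c, out)).1.getD j 0
          = (pvLow (pvKeyOf kf L) data (j + 1) : Int) - (pvCnt (pvKeyOf kf L) suf j : Int)) ∧
      (∀ j : Nat, j < L → ∀ t : Nat,
        pvLow (pvKeyOf kf L) data (j + 1) - pvCnt (pvKeyOf kf L) suf j ≤ t →
        t < pvLow (pvKeyOf kf L) data (j + 1) →
        (suf.foldr (fun item s =>
          (PySem.List.pySetD s.1 (kf item) (PySem.List.pyGetD s.1 (kf item) 0 - 1),
           PySem.List.pySetD s.2
             (PySem.List.pyGetD (PySem.List.pySetD s.1 (kf item) (PySem.List.pyGetD s.1 (kf item) 0 - 1)) (kf item) 0)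
             (some item))) (c, out)).2.getD t none
          = (suf.filter (fun x => pvKeyOf kf L x == j))[t - (pvLow (pvKeyOf kf L) data (j + 1) - pvCnt (pvKeyOf kf L) suf j)]?) ∧
      (∀ t : Nat, t < data.length →
        (∀ j : Nat, j < L → t < pvLow (pvKeyOf kf L) data (j + 1) - pvCnt (pvKeyOf kf L) suf j ∨ pvLow (pvKeyOf kf L) data (j + 1) ≤ t) →
        (suf.foldr (fun item s =>
          (PySem.List.pySetD s.1 (kf item) (PySem.List.pyGetD s.1 (kf item) 0 - 1),
           PySem.List.pySetD s.2
             (PySem.List.pyGetD (PySem.List.pySetD s.1 (kf item) (PySem.List.pyGetD s.1 (kf item) 0 - 1)) (kf item) 0)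
             (some item))) (c, out)).2.getD t none = none) := by
  intro suf
  induction suf with
  | nil =>
    intro pre hpre
    simp only [List.foldr_nil]
    refine ⟨hc, hout, fun j hj => ?_, fun j hj t ht1 ht2 => ?_, fun t ht _ => hall t ht⟩
    · rw [hini j hj]; simp [pvCnt]
    · exfalso; simp [pvCnt] at ht1; omega
  | cons x rest ih =>
    intro pre hpre
    obtain ⟨ih1, ih2, ih3, ih4, ih5⟩ := ih (pre ++ [x]) (by simp [hpre])
    set g := pvKeyOf kf L with hg
    set r := rest.foldr (fun item s =>
      (PySem.List.pySetD s.1 (kf item) (PySem.List.pyGetD s.1 (kf item) 0 - 1),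
       PySem.List.pySetD s.2
         (PySem.List.pyGetD (PySem.List.pySetD s.1 (kf item) (PySem.List.pyGetD s.1 (kf item) 0 - 1)) (kf item) 0)
         (some item))) (c, out) with hr
    simp only [List.foldr_cons, ← hr]
    -- facts about x and the counts
    have hxmem : x ∈ data := by rw [hpre]; simp
    have hkx := hk x hxmem
    have hgx : g x < L := pv_key_lt kf L hL x
    set i := g x with hi
    have hcnt_cons : pvCnt g (x :: rest) i = pvCnt g rest i + 1 := by
      simp [pvCnt, List.countP_cons, ← hi]
    have hcnt_cons_ne : ∀ j : Nat, j ≠ i → pvCnt g (x :: rest) j = pvCnt g rest j := by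
      intro j hj
      have : (g x == j) = false := by simp [← hi]; omega
      simp [pvCnt, List.countP_cons, this]
    have hcnt_data : ∀ j : Nat, pvCnt g (x :: rest) j ≤ pvCnt g data j := by
      intro j
      rw [hpre, pv_cnt_append]
      omega
    have hlow_le_len : ∀ j : Nat, pvLow g data j ≤ data.length := fun j => List.countP_le_length
    have hlow_i : pvLow g data (i + 1) = pvLow g data i + pvCnt g data i := pv_low_succ g data i
    -- the written slot
    set tN := pvLow g data (i + 1) - pvCnt g (x :: rest) i with htN
    have htN_lt : tN < data.length := by
      have h1 : pvLow g data (i + 1) ≤ data.length := hlow_le_len (i + 1)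
      have h2 : pvCnt g (x :: rest) i ≥ 1 := by omega
      have h3 : pvCnt g (x :: rest) i ≤ pvCnt g data i := hcnt_data i
      omega
    have htN_ge : pvLow g data i ≤ tN := by
      have h3 : pvCnt g (x :: rest) i ≤ pvCnt g data i := hcnt_data i
      omega
    -- the step, normalised
    have hstep1 : PySem.List.pySetD r.1 (kf x) (PySem.List.pyGetD r.1 (kf x) 0 - 1)
        = r.1.set i (r.1.getD i 0 - 1) := by
      rw [pv_pyGetD_key r.1 kf L x 0 ih1 hkx, pv_pySetD_key r.1 kf L x _ ih1 hkx]
    have hval : r.1.getD i 0 - 1 = (tN : Int) := by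
      rw [ih3 i hgx]
      have h3 : pvCnt g (x :: rest) i ≤ pvCnt g data i := hcnt_data i
      have h4 : pvCnt g rest i ≤ pvCnt g data i := by omega
      have h5 : pvCnt g data i ≤ pvLow g data (i + 1) := by omega
      push_cast
      omega
    have hget2 : PySem.List.pyGetD (r.1.set i (r.1.getD i 0 - 1)) (kf x) 0 = (tN : Int) := by
      rw [pv_pyGetD_key _ kf L x 0 (by simp [ih1]) hkx, ← hg, ← hi]
      rw [pv_getD_set' r.1 0 i i _ (by rw [ih1]; exact hgx), if_pos rfl]
      exact hval
    have hstep2 : PySem.List.pySetD r.2 (PySem.List.pyGetD (r.1.set i (r.1.getD i 0 - 1)) (kf x) 0) (some x)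
        = r.2.set tN (some x) := by
      rw [hget2, pv_pySetD_nat r.2 tN (some x) (by rw [ih2]; exact htN_lt)]
    rw [hstep1, hstep2]
    refine ⟨by simp [ih1], by simp [ih2], fun j hj => ?_, fun j hj t ht1 ht2 => ?_, fun t ht houts => ?_⟩
    · -- count values
      rw [pv_getD_set' r.1 0 i j _ (by rw [ih1]; exact hgx)]
      by_cases hje : j = i
      · subst hje
        rw [if_pos rfl, ih3 i hj, hcnt_cons]
        push_cast; ring
      · rw [if_neg hje, ih3 j hj, hcnt_cons_ne j hje]
    · -- the filled regions
      by_cases hje : j = i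
      · subst hje
        have hfilter : (x :: rest).filter (fun y => g y == i) = x :: rest.filter (fun y => g y == i) := by
          simp [List.filter_cons, ← hi]
        rw [hfilter]
        rcases Nat.eq_or_lt_of_le ht1 with hteq | htlt
        · -- t is exactly the written slot
          have hteq' : t = tN := by omega
          subst hteq'
          rw [pv_getD_set' r.2 none tN tN _ (by rw [ih2]; exact htN_lt), if_pos rfl]
          rw [show tN - (pvLow g data (i + 1) - pvCnt g (x :: rest) i) = 0 by omega]
          rfl
        · -- t is inside the part already filled from rest
          have htne : t ≠ tN := by omega
          rw [pv_getD_set' r.2 none tN t _ (by rw [ih2]; exact htN_lt), if_neg htne]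
          have h3 : pvCnt g (x :: rest) i ≤ pvCnt g data i := hcnt_data i
          have hrest := ih4 i hj t (by omega) ht2
          rw [hrest]
          have hidx : t - (pvLow g data (i + 1) - pvCnt g rest i)
              = (t - (pvLow g data (i + 1) - pvCnt g (x :: rest) i)) - 1 := by omega
          rw [hidx]
          have hpos : 1 ≤ t - (pvLow g data (i + 1) - pvCnt g (x :: rest) i) := by omega
          rcases Nat.exists_eq_add_of_le hpos with ⟨m, hm⟩
          rw [hm]
          simp [Nat.add_comm 1 m]
      · -- other buckets are untouched by this write
        have h3j : pvCnt g (x :: rest) j ≤ pvCnt g data j := hcnt_data j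
        have hlowj : pvLow g data (j + 1) = pvLow g data j + pvCnt g data j := pv_low_succ g data j
        have htne : t ≠ tN := by
          rcases Nat.lt_or_ge j i with hji | hji
          · have : pvLow g data (j + 1) ≤ pvLow g data i := pv_low_mono g data (by omega)
            omega
          · have hij : i + 1 ≤ j := by omega
            have hm1 : pvLow g data (i + 1) ≤ pvLow g data j := pv_low_mono g data hij
            have h3i := hcnt_data i
            omega
        rw [pv_getD_set' r.2 none tN t _ (by rw [ih2]; exact htN_lt), if_neg htne]
        rw [hcnt_cons_ne j hje] at ht1 ⊢
        have hfilter : (x :: rest).filter (fun y => g y == j) = rest.filter (fun y => g y == j) := by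
          have : (g x == j) = false := by simp [← hi]; omega
          simp [List.filter_cons, this]
        rw [hfilter]
        exact ih4 j hj t ht1 ht2
    · -- slots in no region stay empty
      have htne : t ≠ tN := by
        have hspec := houts i hgx
        have h3i := hcnt_data i
        omega
      rw [pv_getD_set' r.2 none tN t _ (by rw [ih2]; exact htN_lt), if_neg htne]
      apply ih5 t ht
      intro j hj
      have := houts j hj
      by_cases hje : j = i
      · subst hje; omega
      · rw [hcnt_cons_ne j hje] at this; omega


theorem pv_reduceOption_map_some (l : List PvTup) : (l.map some).reduceOption = l := by
  induction l with
  | nil => rfl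
  | cons a t ih => simp [List.reduceOption_cons_of_some, ih]

-- ---- the Array ports of Python's index ops agree with the List ones through .toList ----

theorem pv_pyGetA_toList {α : Type} (a : Array α) (i : Int) (d : α) :
    pv_pyGetA a i d = PySem.List.pyGetD a.toList i d := by
  unfold pv_pyGetA PySem.List.pyGetD PySem.List.pyGet?
  simp only [Array.length_toList]
  cases h : PySem.List.pyIdx? a.size i with
  | none => simp
  | some n =>
    simp only [Option.getD_some, Option.getD_none]
    by_cases hn : n < a.size
    · simp [Array.getD, hn, List.getD_eq_getElem?_getD, List.getElem?_eq_getElem, hn]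
    · simp [Array.getD, hn, List.getD_eq_getElem?_getD, List.getElem?_eq_none_iff]

theorem pv_pySetA_toList {α : Type} (a : Array α) (i : Int) (v : α) :
    (pv_pySetA a i v).toList = PySem.List.pySetD a.toList i v := by
  unfold pv_pySetA PySem.List.pySetD PySem.List.pySet?
  simp only [Array.length_toList]
  cases h : PySem.List.pyIdx? a.size i with
  | none => simp
  | some n => simp

theorem pv_fold1_toList (kf : PvTup → Int) :
    ∀ (data : List PvTup) (c : Array Int),
    (data.foldl (fun c item => pv_pySetA c (kf item) (pv_pyGetA c (kf item) 0 + 1)) c).toList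
      = data.foldl (fun c item =>
          PySem.List.pySetD c (kf item) (PySem.List.pyGetD c (kf item) 0 + 1)) c.toList := by
  intro data
  induction data with
  | nil => intro c; rfl
  | cons x t ih =>
    intro c
    simp only [List.foldl_cons]
    rw [ih, pv_pySetA_toList, pv_pyGetA_toList]

theorem pv_fold2_toList :
    ∀ (rs : List Int) (c : Array Int),
    (rs.foldl (fun c i => pv_pySetA c i (pv_pyGetA c i 0 + pv_pyGetA c (i - 1) 0)) c).toList
      = rs.foldl (fun c i =>
          PySem.List.pySetD c i (PySem.List.pyGetD c i 0 + PySem.List.pyGetD c (i - 1) 0)) c.toList := by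
  intro rs
  induction rs with
  | nil => intro c; rfl
  | cons x t ih =>
    intro c
    simp only [List.foldl_cons]
    rw [ih, pv_pySetA_toList, pv_pyGetA_toList, pv_pyGetA_toList]

theorem pv_fold3_toList (kf : PvTup → Int) :
    ∀ (data : List PvTup) (c : Array Int) (out : Array (Option PvTup)),
    ((data.foldl (fun (s : Array Int × Array (Option PvTup)) item =>
        (pv_pySetA s.1 (kf item) (pv_pyGetA s.1 (kf item) 0 - 1),
         pv_pySetA s.2
           (pv_pyGetA (pv_pySetA s.1 (kf item) (pv_pyGetA s.1 (kf item) 0 - 1)) (kf item) 0)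
           (some item))) (c, out)).1.toList,
     (data.foldl (fun (s : Array Int × Array (Option PvTup)) item =>
        (pv_pySetA s.1 (kf item) (pv_pyGetA s.1 (kf item) 0 - 1),
         pv_pySetA s.2
           (pv_pyGetA (pv_pySetA s.1 (kf item) (pv_pyGetA s.1 (kf item) 0 - 1)) (kf item) 0)
           (some item))) (c, out)).2.toList)
      = data.foldl (fun (s : List Int × List (Option PvTup)) item =>
          (PySem.List.pySetD s.1 (kf item) (PySem.List.pyGetD s.1 (kf item) 0 - 1),
           PySem.List.pySetD s.2
             (PySem.List.pyGetD (PySem.List.pySetD s.1 (kf item) (PySem.List.pyGetD s.1 (kf item) 0 - 1)) (kf item) 0)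
             (some item))) (c.toList, out.toList) := by
  intro data
  induction data with
  | nil => intro c out; rfl
  | cons x t ih =>
    intro c out
    simp only [List.foldl_cons]
    rw [ih]
    simp only [pv_pySetA_toList, pv_pyGetA_toList]

-- ---- one counting-sort pass equals its bucket normal form ----

theorem pv_cs (data : List PvTup) (kf : PvTup → Int) (sz : Nat) (hsz : 0 < sz)
    (hk : ∀ x ∈ data, -(sz : Int) ≤ kf x ∧ kf x < sz) :
    pv_counting_sort data kf ((sz : Int) - 1) = pvF sz (pvKeyOf kf sz) data := by
  unfold pv_counting_sort
  dsimp only []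
  have hrepA : (Array.replicate ((sz : Int) - 1 + 1).toNat (0:Int)).toList
      = List.replicate sz (0:Int) := by
    rw [show ((sz : Int) - 1 + 1) = (sz : Int) by ring]
    simp
  have houtA : (Array.replicate data.length (none : Option PvTup)).toList
      = List.replicate data.length none := by simp
  obtain ⟨h1len, h1val⟩ := pv_loop1 kf sz hsz data hk (List.replicate sz (0:Int)) (by simp)
  set c1 := data.foldl (fun c item =>
    PySem.List.pySetD c (kf item) (PySem.List.pyGetD c (kf item) 0 + 1)) (List.replicate sz (0:Int)) with hc1
  set c1A := data.foldl (fun c item =>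
    pv_pySetA c (kf item) (pv_pyGetA c (kf item) 0 + 1))
    (Array.replicate ((sz : Int) - 1 + 1).toNat (0:Int)) with hc1A
  have hc1AL : c1A.toList = c1 := by
    rw [hc1A, pv_fold1_toList kf data, hrepA, hc1]
  have hc1Asz : ((c1A.size : Nat) : Int) = ((sz : Nat) : Int) := by
    rw [← Array.length_toList, hc1AL, h1len]
  rw [hc1Asz]
  obtain ⟨h2len, h2in, _⟩ := pv_loop2_aux sz c1 h1len sz (le_refl _)
  set c2 := (PySem.List.pyRange 1 ((sz : Nat) : Int) 1).foldl (fun c i =>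
    PySem.List.pySetD c i (PySem.List.pyGetD c i 0 + PySem.List.pyGetD c (i - 1) 0)) c1 with hc2
  set c2A := (PySem.List.pyRange 1 ((sz : Nat) : Int) 1).foldl (fun c i =>
    pv_pySetA c i (pv_pyGetA c i 0 + pv_pyGetA c (i - 1) 0)) c1A with hc2A
  have hc2AL : c2A.toList = c2 := by
    rw [hc2A, pv_fold2_toList, hc1AL, hc2]
  have hc2val : ∀ j : Nat, j < sz → c2.getD j 0 = (pvLow (pvKeyOf kf sz) data (j + 1) : Int) := by
    intro j hj
    rw [h2in j hj, pv_low_eq_sum]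
    apply Finset.sum_congr rfl
    intro i hi
    have hi' : i < sz := by have := Finset.mem_range.mp hi; omega
    rw [h1val i hi']
    simp [List.getD_eq_getElem?_getD, List.getElem?_replicate, hi']
  have hpair := pv_fold3_toList kf data.reverse c2A (Array.replicate data.length none)
  have hsnd : ((data.reverse.foldl (fun (s : Array Int × Array (Option PvTup)) item =>
        (pv_pySetA s.1 (kf item) (pv_pyGetA s.1 (kf item) 0 - 1),
         pv_pySetA s.2
           (pv_pyGetA (pv_pySetA s.1 (kf item) (pv_pyGetA s.1 (kf item) 0 - 1)) (kf item) 0)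
           (some item))) (c2A, Array.replicate data.length none)).2).toList
      = (data.reverse.foldl (fun (s : List Int × List (Option PvTup)) item =>
          (PySem.List.pySetD s.1 (kf item) (PySem.List.pyGetD s.1 (kf item) 0 - 1),
           PySem.List.pySetD s.2
             (PySem.List.pyGetD (PySem.List.pySetD s.1 (kf item) (PySem.List.pyGetD s.1 (kf item) 0 - 1)) (kf item) 0)
             (some item))) (c2A.toList, (Array.replicate data.length (none : Option PvTup)).toList)).2 :=
    congrArg Prod.snd hpair
  rw [hsnd, hc2AL, houtA, List.foldl_reverse]
  have hg : ∀ x ∈ data, pvKeyOf kf sz x < sz := fun x _ => pv_key_lt kf sz hsz x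
  obtain ⟨h3clen, h3olen, h3c, h3in, h3out⟩ :=
    pv_loop3 data kf sz hsz hk c2 (List.replicate data.length none) h2len (by simp)
      hc2val (fun t ht => by simp [List.getD_eq_getElem?_getD, List.getElem?_replicate, ht])
      data [] rfl
  set st := data.foldr (fun item s =>
    (PySem.List.pySetD s.1 (kf item) (PySem.List.pyGetD s.1 (kf item) 0 - 1),
     PySem.List.pySetD s.2
       (PySem.List.pyGetD (PySem.List.pySetD s.1 (kf item) (PySem.List.pyGetD s.1 (kf item) 0 - 1)) (kf item) 0)
       (some item))) (c2, List.replicate data.length none) with hst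
  have hlow_len : pvLow (pvKeyOf kf sz) data sz = data.length := pv_low_eq_length _ _ _ hg
  have hmain : st.2 = (pvF sz (pvKeyOf kf sz) data).map some := by
    apply List.ext_getElem?
    intro t
    rcases Nat.lt_or_ge t data.length with ht | ht
    · obtain ⟨j, hj, hjl, hjr⟩ := pv_exists_region (pvKeyOf kf sz) data sz t (by omega)
      have hcntd : pvLow (pvKeyOf kf sz) data (j + 1) - pvCnt (pvKeyOf kf sz) data j
          = pvLow (pvKeyOf kf sz) data j := by rw [pv_low_succ]; omega
      have hval := h3in j hj t (by omega) hjr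
      rw [hcntd] at hval
      have hflen : t - pvLow (pvKeyOf kf sz) data j < (data.filter (fun x => pvKeyOf kf sz x == j)).length := by
        rw [pv_cnt_eq_filter_length]
        have := pv_low_succ (pvKeyOf kf sz) data j
        omega
      have hleft : st.2[t]? = some (st.2.getD t none) := by
        rw [List.getD_eq_getElem?_getD]
        have : t < st.2.length := by rw [h3olen]; exact ht
        simp [List.getElem?_eq_getElem this]
      rw [hleft, hval]
      rw [List.getElem?_map, pvF_getElem? _ _ sz j t hj hjl hjr]
      rw [List.getElem?_eq_getElem hflen]
      rfl
    · have hl : st.2[t]? = none := by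
        rw [List.getElem?_eq_none_iff, h3olen]; omega
      have hr : ((pvF sz (pvKeyOf kf sz) data).map some)[t]? = none := by
        rw [List.getElem?_eq_none_iff, List.length_map, pvF_length, hlow_len]; omega
      rw [hl, hr]
  rw [hmain, pv_reduceOption_map_some]

-- ---- one bucket-sort pass (B's pass) equals the same bucket normal form ----

theorem pv_bucket_inv (kf : PvTup → Int) (sz : Nat) (hsz : 0 < sz) :
    ∀ (data : List PvTup), (∀ x ∈ data, -(sz : Int) ≤ kf x ∧ kf x < sz) →
    ∀ (bs : List (List PvTup)), bs.length = sz →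
      (data.foldl (fun bs d =>
        PySem.List.pySetD bs (kf d) (PySem.List.pyGetD bs (kf d) [] ++ [d])) bs).length = sz ∧
      ∀ j : Nat, j < sz →
        (data.foldl (fun bs d =>
          PySem.List.pySetD bs (kf d) (PySem.List.pyGetD bs (kf d) [] ++ [d])) bs).getD j []
          = bs.getD j [] ++ data.filter (fun x => pvKeyOf kf sz x == j) := by
  intro data
  induction data with
  | nil => intro _ bs hb; exact ⟨hb, fun j _ => by simp⟩
  | cons x t ih =>
    intro hk bs hb
    have hx := hk x (by simp)
    have hstep : PySem.List.pySetD bs (kf x) (PySem.List.pyGetD bs (kf x) [] ++ [x])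
        = bs.set (pvKeyOf kf sz x) (bs.getD (pvKeyOf kf sz x) [] ++ [x]) := by
      rw [pv_pyGetD_key bs kf sz x [] hb hx, pv_pySetD_key bs kf sz x _ hb hx]
    have hkey : pvKeyOf kf sz x < sz := pv_key_lt kf sz hsz x
    have hlen : (bs.set (pvKeyOf kf sz x) (bs.getD (pvKeyOf kf sz x) [] ++ [x])).length = sz := by
      simp [hb]
    obtain ⟨ihlen, ihval⟩ := ih (fun y hy => hk y (by simp [hy])) _ hlen
    refine ⟨by simpa [hstep] using ihlen, fun j hj => ?_⟩
    simp only [List.foldl_cons, hstep]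
    rw [ihval j hj, pv_getD_set' bs [] (pvKeyOf kf sz x) j _ (by omega)]
    by_cases h : j = pvKeyOf kf sz x
    · subst h
      simp [List.filter_cons]
    · have hne : (pvKeyOf kf sz x == j) = false := by simp; omega
      rw [if_neg h]
      simp [List.filter_cons, hne]

theorem pv_bucket (data : List PvTup) (kf : PvTup → Int) (sz : Nat) (hsz : 0 < sz)
    (hk : ∀ x ∈ data, -(sz : Int) ≤ kf x ∧ kf x < sz) :
    (data.foldl (fun bs d =>
      PySem.List.pySetD bs (kf d) (PySem.List.pyGetD bs (kf d) [] ++ [d]))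
      (List.replicate sz ([] : List PvTup))).flatten = pvF sz (pvKeyOf kf sz) data := by
  obtain ⟨hlen, hval⟩ := pv_bucket_inv kf sz hsz data hk (List.replicate sz []) (by simp)
  set r := data.foldl (fun bs d =>
    PySem.List.pySetD bs (kf d) (PySem.List.pyGetD bs (kf d) [] ++ [d]))
    (List.replicate sz ([] : List PvTup)) with hr
  have hmap : r = (List.range sz).map (fun k => data.filter (fun x => pvKeyOf kf sz x == k)) := by
    apply List.ext_getElem
    · simp [hlen]
    · intro j hj1 hj2
      have hjsz : j < sz := by simpa [hlen] using hj1
      have h1 : r[j] = r.getD j [] := by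
        rw [List.getD_eq_getElem?_getD, List.getElem?_eq_getElem hj1]
        rfl
      rw [h1, hval j hjsz]
      simp [List.getD_eq_getElem?_getD, List.getElem?_replicate, hjsz]
  rw [hmap, ← List.flatMap_def]
  rfl

-- ===== VERDICT (by name: the statement is the Claim_ definition above) =====
set_option maxHeartbeats 1000000 in
theorem radix_sort_dates_spec : Claim_equal_radix_sort_dates := by
  intro dates _ hpre
  unfold Spec_radix_sort_dates
  -- A's driver is six counting-sort passes (the dict lookups evaluate)
  have hA : radix_sort_dates dates =
      pv_counting_sort (pv_counting_sort (pv_counting_sort (pv_counting_sort (pv_counting_sort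
        (pv_counting_sort dates (fun x => x.2.2.2.2.2) 99) (fun x => x.2.2.2.2.1) 99)
        (fun x => x.2.2.2.1) 99) (fun x => x.2.2.1) 99) (fun x => x.2.1) 99) (fun x => x.1) 9999 := by
    unfold radix_sort_dates
    simp only [List.foldl_cons, List.foldl_nil]
    rw [show PySem.Dict.getD (PySem.Dict.ofList
        [("second", (99:Int)), ("minute", 99), ("hour", 99), ("day", 99), ("month", 99), ("year", 9999)]) "second" 0 = 99 from by decide,
      show PySem.Dict.getD (PySem.Dict.ofList
        [("second", (99:Int)), ("minute", 99), ("hour", 99), ("day", 99), ("month", 99), ("year", 9999)]) "minute" 0 = 99 from by decide,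
      show PySem.Dict.getD (PySem.Dict.ofList
        [("second", (99:Int)), ("minute", 99), ("hour", 99), ("day", 99), ("month", 99), ("year", 9999)]) "hour" 0 = 99 from by decide,
      show PySem.Dict.getD (PySem.Dict.ofList
        [("second", (99:Int)), ("minute", 99), ("hour", 99), ("day", 99), ("month", 99), ("year", 9999)]) "day" 0 = 99 from by decide,
      show PySem.Dict.getD (PySem.Dict.ofList
        [("second", (99:Int)), ("minute", 99), ("hour", 99), ("day", 99), ("month", 99), ("year", 9999)]) "month" 0 = 99 from by decide,
      show PySem.Dict.getD (PySem.Dict.ofList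
        [("second", (99:Int)), ("minute", 99), ("hour", 99), ("day", 99), ("month", 99), ("year", 9999)]) "year" 0 = 9999 from by decide]
  -- B's driver is six bucket-sort passes
  have hB : radix_sort_dates_alt dates =
      ((((((dates.foldl (fun bs d => PySem.List.pySetD bs (d.2.2.2.2.2) (PySem.List.pyGetD bs (d.2.2.2.2.2) [] ++ [d])) (List.replicate 100 [])).flatten.foldl
          (fun bs d => PySem.List.pySetD bs (d.2.2.2.2.1) (PySem.List.pyGetD bs (d.2.2.2.2.1) [] ++ [d])) (List.replicate 100 [])).flatten.foldl
          (fun bs d => PySem.List.pySetD bs (d.2.2.2.1) (PySem.List.pyGetD bs (d.2.2.2.1) [] ++ [d])) (List.replicate 100 [])).flatten.foldl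
          (fun bs d => PySem.List.pySetD bs (d.2.2.1) (PySem.List.pyGetD bs (d.2.2.1) [] ++ [d])) (List.replicate 100 [])).flatten.foldl
          (fun bs d => PySem.List.pySetD bs (d.2.1) (PySem.List.pyGetD bs (d.2.1) [] ++ [d])) (List.replicate 100 [])).flatten.foldl
          (fun bs d => PySem.List.pySetD bs (d.1) (PySem.List.pyGetD bs (d.1) [] ++ [d])) (List.replicate 10000 [])).flatten := by
    unfold radix_sort_dates_alt
    simp only [List.foldl_cons, List.foldl_nil]
    rfl
  have hb100 : (99 : Int) = ((100 : Nat) : Int) - 1 := by norm_num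
  have hb10000 : (9999 : Int) = ((10000 : Nat) : Int) - 1 := by norm_num
  have hsub1 := pvF_subset 100 pvG1 dates
  have hsub2 : ∀ x ∈ pvF 100 pvG2 (pvF 100 pvG1 dates), x ∈ dates :=
    fun x hx => hsub1 x (pvF_subset _ _ _ x hx)
  have hsub3 : ∀ x ∈ pvF 100 pvG3 (pvF 100 pvG2 (pvF 100 pvG1 dates)), x ∈ dates :=
    fun x hx => hsub2 x (pvF_subset _ _ _ x hx)
  have hsub4 : ∀ x ∈ pvF 100 pvG4 (pvF 100 pvG3 (pvF 100 pvG2 (pvF 100 pvG1 dates))), x ∈ dates :=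
    fun x hx => hsub3 x (pvF_subset _ _ _ x hx)
  have hsub5 : ∀ x ∈ pvF 100 pvG5 (pvF 100 pvG4 (pvF 100 pvG3 (pvF 100 pvG2 (pvF 100 pvG1 dates)))), x ∈ dates :=
    fun x hx => hsub4 x (pvF_subset _ _ _ x hx)
  have hk1 : ∀ x ∈ dates, -((100:Nat) : Int) ≤ x.2.2.2.2.2 ∧ x.2.2.2.2.2 < (100:Nat) :=
    fun x hx => by have := hpre x hx; push_cast; omega
  have hk2 : ∀ x ∈ pvF 100 pvG1 dates, -((100:Nat) : Int) ≤ x.2.2.2.2.1 ∧ x.2.2.2.2.1 < (100:Nat) :=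
    fun x hx => by have := hpre x (hsub1 x hx); push_cast; omega
  have hk3 : ∀ x ∈ pvF 100 pvG2 (pvF 100 pvG1 dates), -((100:Nat) : Int) ≤ x.2.2.2.1 ∧ x.2.2.2.1 < (100:Nat) :=
    fun x hx => by have := hpre x (hsub2 x hx); push_cast; omega
  have hk4 : ∀ x ∈ pvF 100 pvG3 (pvF 100 pvG2 (pvF 100 pvG1 dates)), -((100:Nat) : Int) ≤ x.2.2.1 ∧ x.2.2.1 < (100:Nat) :=
    fun x hx => by have := hpre x (hsub3 x hx); push_cast; omega
  have hk5 : ∀ x ∈ pvF 100 pvG4 (pvF 100 pvG3 (pvF 100 pvG2 (pvF 100 pvG1 dates))), -((100:Nat) : Int) ≤ x.2.1 ∧ x.2.1 < (100:Nat) :=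
    fun x hx => by have := hpre x (hsub4 x hx); push_cast; omega
  have hk6 : ∀ x ∈ pvF 100 pvG5 (pvF 100 pvG4 (pvF 100 pvG3 (pvF 100 pvG2 (pvF 100 pvG1 dates)))), -((10000:Nat) : Int) ≤ x.1 ∧ x.1 < (10000:Nat) :=
    fun x hx => by have := hpre x (hsub5 x hx); push_cast; omega
  -- A's passes, one by one
  have e1 : pv_counting_sort dates (fun x => x.2.2.2.2.2) 99 = pvF 100 pvG1 dates := by
    rw [hb100]; exact pv_cs dates _ 100 (by norm_num) hk1
  have e2 : pv_counting_sort (pvF 100 pvG1 dates) (fun x => x.2.2.2.2.1) 99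
      = pvF 100 pvG2 (pvF 100 pvG1 dates) := by
    rw [hb100]; exact pv_cs _ _ 100 (by norm_num) hk2
  have e3 : pv_counting_sort (pvF 100 pvG2 (pvF 100 pvG1 dates)) (fun x => x.2.2.2.1) 99
      = pvF 100 pvG3 (pvF 100 pvG2 (pvF 100 pvG1 dates)) := by
    rw [hb100]; exact pv_cs _ _ 100 (by norm_num) hk3
  have e4 : pv_counting_sort (pvF 100 pvG3 (pvF 100 pvG2 (pvF 100 pvG1 dates))) (fun x => x.2.2.1) 99
      = pvF 100 pvG4 (pvF 100 pvG3 (pvF 100 pvG2 (pvF 100 pvG1 dates))) := by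
    rw [hb100]; exact pv_cs _ _ 100 (by norm_num) hk4
  have e5 : pv_counting_sort (pvF 100 pvG4 (pvF 100 pvG3 (pvF 100 pvG2 (pvF 100 pvG1 dates)))) (fun x => x.2.1) 99
      = pvF 100 pvG5 (pvF 100 pvG4 (pvF 100 pvG3 (pvF 100 pvG2 (pvF 100 pvG1 dates)))) := by
    rw [hb100]; exact pv_cs _ _ 100 (by norm_num) hk5
  have e6 : pv_counting_sort (pvF 100 pvG5 (pvF 100 pvG4 (pvF 100 pvG3 (pvF 100 pvG2 (pvF 100 pvG1 dates))))) (fun x => x.1) 9999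
      = pvF 10000 pvG6 (pvF 100 pvG5 (pvF 100 pvG4 (pvF 100 pvG3 (pvF 100 pvG2 (pvF 100 pvG1 dates))))) := by
    rw [hb10000]; exact pv_cs _ _ 10000 (by norm_num) hk6
  -- B's passes, one by one (same normal forms)
  have f1 : (dates.foldl (fun bs d => PySem.List.pySetD bs (d.2.2.2.2.2) (PySem.List.pyGetD bs (d.2.2.2.2.2) [] ++ [d])) (List.replicate 100 [])).flatten
      = pvF 100 pvG1 dates :=
    pv_bucket dates (fun x => x.2.2.2.2.2) 100 (by norm_num) hk1
  have f2 : ((pvF 100 pvG1 dates).foldl (fun bs d => PySem.List.pySetD bs (d.2.2.2.2.1) (PySem.List.pyGetD bs (d.2.2.2.2.1) [] ++ [d])) (List.replicate 100 [])).flatten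
      = pvF 100 pvG2 (pvF 100 pvG1 dates) :=
    pv_bucket _ (fun x => x.2.2.2.2.1) 100 (by norm_num) hk2
  have f3 : ((pvF 100 pvG2 (pvF 100 pvG1 dates)).foldl (fun bs d => PySem.List.pySetD bs (d.2.2.2.1) (PySem.List.pyGetD bs (d.2.2.2.1) [] ++ [d])) (List.replicate 100 [])).flatten
      = pvF 100 pvG3 (pvF 100 pvG2 (pvF 100 pvG1 dates)) :=
    pv_bucket _ (fun x => x.2.2.2.1) 100 (by norm_num) hk3
  have f4 : ((pvF 100 pvG3 (pvF 100 pvG2 (pvF 100 pvG1 dates))).foldl (fun bs d => PySem.List.pySetD bs (d.2.2.1) (PySem.List.pyGetD bs (d.2.2.1) [] ++ [d])) (List.replicate 100 [])).flatten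
      = pvF 100 pvG4 (pvF 100 pvG3 (pvF 100 pvG2 (pvF 100 pvG1 dates))) :=
    pv_bucket _ (fun x => x.2.2.1) 100 (by norm_num) hk4
  have f5 : ((pvF 100 pvG4 (pvF 100 pvG3 (pvF 100 pvG2 (pvF 100 pvG1 dates)))).foldl (fun bs d => PySem.List.pySetD bs (d.2.1) (PySem.List.pyGetD bs (d.2.1) [] ++ [d])) (List.replicate 100 [])).flatten
      = pvF 100 pvG5 (pvF 100 pvG4 (pvF 100 pvG3 (pvF 100 pvG2 (pvF 100 pvG1 dates)))) :=
    pv_bucket _ (fun x => x.2.1) 100 (by norm_num) hk5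
  have f6 : ((pvF 100 pvG5 (pvF 100 pvG4 (pvF 100 pvG3 (pvF 100 pvG2 (pvF 100 pvG1 dates))))).foldl (fun bs d => PySem.List.pySetD bs (d.1) (PySem.List.pyGetD bs (d.1) [] ++ [d])) (List.replicate 10000 [])).flatten
      = pvF 10000 pvG6 (pvF 100 pvG5 (pvF 100 pvG4 (pvF 100 pvG3 (pvF 100 pvG2 (pvF 100 pvG1 dates))))) :=
    pv_bucket _ (fun x => x.1) 10000 (by norm_num) hk6
  rw [hA, e1, e2, e3, e4, e5, e6, hB, f1, f2, f3, f4, f5, f6]
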